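-- pv_equiv track=rewrite | github.com/DillanCodes2/simgames | monosim/Simulator.py | lineup_tag
-- ===== SOURCE A (Python) =====
-- from typing import List, Dict, Tuple, Optional
--
-- KNOWN_STRATEGIES = {"Aggressive", "Cautious", "RailRoadTycoon", "ColorCollector"}
--
-- STRATEGY_ORDER = tuple(sorted(KNOWN_STRATEGIES))
--
-- def lineup_tag(strategies: List[str]) -> str:
--     """
--     Stable, human-readable identifier for a 4-player lineup, ignoring seating.
--     Example: "Aggressive=2|Cautious=1|RailRoadTycoon=1"
--     """
--     counts = {s: 0 for s in STRATEGY_ORDER}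
--     for s in strategies:
--         if s not in KNOWN_STRATEGIES:
--             raise ValueError(f"Unknown strategy '{s}'")
--         counts[s] += 1
--     parts = [f"{s}={counts[s]}" for s in STRATEGY_ORDER if counts[s] > 0]
--     return "|".join(parts) if parts else "EMPTY"
-- ===== SOURCE B (Python) =====
-- from itertools import groupby
--
-- KNOWN_STRATEGIES = {"Aggressive", "Cautious", "RailRoadTycoon", "ColorCollector"}
--
-- def lineup_tag(strategies):
--     for s in strategies:
--         if s not in KNOWN_STRATEGIES:
--             raise ValueError(f"Unknown strategy '{s}'")
--     parts = [f"{s}={len(list(grp))}" for s, grp in groupby(sorted(strategies))]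
--     return "|".join(parts) if parts else "EMPTY"
-- ===== Notes on version B (the rewrite author's own statement) =====
-- stated objective: alternative
-- what changed: Replaces the pre-initialized count dict and the filtered scan over STRATEGY_ORDER by sort-then-groupby: counts and output order come from sorted(strategies) run lengths, with only the validation loop kept first.
import Mathlib
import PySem

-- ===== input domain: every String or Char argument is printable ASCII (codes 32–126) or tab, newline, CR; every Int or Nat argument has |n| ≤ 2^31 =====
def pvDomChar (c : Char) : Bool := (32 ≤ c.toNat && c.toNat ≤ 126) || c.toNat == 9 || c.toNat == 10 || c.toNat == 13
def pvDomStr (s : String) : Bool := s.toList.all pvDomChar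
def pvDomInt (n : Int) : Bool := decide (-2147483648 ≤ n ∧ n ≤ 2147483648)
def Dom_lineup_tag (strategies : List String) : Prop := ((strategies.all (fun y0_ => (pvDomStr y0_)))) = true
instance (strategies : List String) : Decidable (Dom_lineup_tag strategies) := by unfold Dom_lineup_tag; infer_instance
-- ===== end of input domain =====

-- B replaces A's pre-initialized count dict + filtered scan over STRATEGY_ORDER by sort-then-groupby
-- (run lengths of the sorted list); alternative decomposition, not claimed faster. Equivalence is on
-- the return value; on lists with an unknown strategy both programs raise ValueError (outside Pre_).

-- ===== PORT A =====
def KNOWN_STRATEGIES : PySem.Set String :=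
  PySem.Set.ofList ["Aggressive", "Cautious", "RailRoadTycoon", "ColorCollector"]

def STRATEGY_ORDER : List String := PySem.List.sorted KNOWN_STRATEGIES (fun x => x) false

def lineup_tag (strategies : List String) : String :=
  let counts0 : PySem.Dict String Int :=
    PySem.Dict.ofList (STRATEGY_ORDER.map (fun s => (s, (0 : Int))))
  match strategies.foldl (fun acc s =>
      match acc with
      | none => none   -- a previous iteration raised
      | some d =>
        if PySem.Set.contains KNOWN_STRATEGIES s then some (d.modify s 0 (· + 1))
        else none)     -- raise ValueError (excluded by Pre_)
    (some counts0) with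
  | none => ""         -- unreachable under Pre_
  | some counts =>
    let parts := STRATEGY_ORDER.foldl (fun acc s =>
      if counts.getD s 0 > 0 then
        acc ++ [PySem.Str.join "" [s, "=", PySem.Int.toStr (counts.getD s 0)]]
      else acc) []
    if parts ≠ [] then PySem.Str.join "|" parts else "EMPTY"

-- ===== PORT B =====
-- itertools.groupby on a list of strings: the run-length encoding, left to right
def pvRunsGo (cur : String) (n : Int) : List String → List (String × Int)
  | [] => [(cur, n)]
  | y :: ys => if y == cur then pvRunsGo cur (n + 1) ys else (cur, n) :: pvRunsGo y 1 ys

def pvRuns : List String → List (String × Int)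
  | [] => []
  | x :: xs => pvRunsGo x 1 xs

def lineup_tag_alt (strategies : List String) : String :=
  if strategies.all (fun s => PySem.Set.contains KNOWN_STRATEGIES s) then
    let parts := (pvRuns (PySem.List.sorted strategies (fun x => x) false)).map
      (fun p => PySem.Str.join "" [p.1, "=", PySem.Int.toStr p.2])
    if parts ≠ [] then PySem.Str.join "|" parts else "EMPTY"
  else ""              -- raise ValueError (excluded by Pre_)

-- ===== PRECONDITION & SPEC =====
-- Pre_ excludes exactly the inputs on which A (and B) raises ValueError: a list containing a
-- string that is not one of the four known strategy names.
def Pre_lineup_tag (strategies : List String) : Prop :=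
  (strategies.all (fun s =>
    s == "Aggressive" || s == "Cautious" || s == "RailRoadTycoon" || s == "ColorCollector")) = true
instance (strategies : List String) : Decidable (Pre_lineup_tag strategies) := by
  unfold Pre_lineup_tag; infer_instance

def pvWitness_lineup_tag : List String := ["Aggressive", "Cautious", "Aggressive"]

def Spec_lineup_tag (strategies : List String) (out : String) : Prop := out = lineup_tag_alt strategies
instance (strategies : List String) (out : String) : Decidable (Spec_lineup_tag strategies out) := by
  unfold Spec_lineup_tag; infer_instance

-- ===== CLAIM (what is proved, stated in full; the proofs are below) =====
def Claim_equal_lineup_tag : Prop := ∀ (strategies : List String), Dom_lineup_tag strategies → Pre_lineup_tag strategies → Spec_lineup_tag strategies (lineup_tag strategies)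

-- ===== LEMMAS AND PROOFS =====

theorem pv_order_eq : STRATEGY_ORDER = ["Aggressive", "Cautious", "ColorCollector", "RailRoadTycoon"] := by
  unfold STRATEGY_ORDER
  apply PySem.List.sorted_eq_of_perm_of_pairwise_lt
  · decide
  · simp only [List.pairwise_cons, List.mem_cons, List.not_mem_nil]
    refine ⟨?_, ?_, ?_, by simp⟩ <;>
      (intro a ha; rcases ha with rfl | rfl | rfl | h <;>
        first | (rw [String.lt_iff_toList_lt]; decide) | exact h.elim)

theorem pv_map_if {c : Nat} {p : String × Int} {f : String × Int → String} :
    (if c = 0 then ([] : List (String × Int)) else [p]).map f =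
      (if c = 0 then [] else [f p]) := by
  split <;> simp

-- the common normal form both ports are reduced to: the rendered tag from the four counts
def pvPart (s : String) (c : Nat) : String :=
  PySem.Str.join "" [s, "=", PySem.Int.toStr (c : Int)]

def pvRender (c1 c2 c3 c4 : Nat) : String :=
  let parts :=
    (if c1 = 0 then [] else [pvPart "Aggressive" c1]) ++
    (if c2 = 0 then [] else [pvPart "Cautious" c2]) ++
    (if c3 = 0 then [] else [pvPart "ColorCollector" c3]) ++
    (if c4 = 0 then [] else [pvPart "RailRoadTycoon" c4])
  if parts ≠ [] then PySem.Str.join "|" parts else "EMPTY"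

theorem pv_foldOpt (strategies : List String)
    (h : ∀ s ∈ strategies, PySem.Set.contains KNOWN_STRATEGIES s = true)
    (d : PySem.Dict String Int) :
    strategies.foldl (fun acc s =>
      match acc with
      | none => none
      | some d =>
        if PySem.Set.contains KNOWN_STRATEGIES s then some (d.modify s 0 (· + 1))
        else none) (some d)
    = some (strategies.foldl (fun d s => d.modify s 0 (· + 1)) d) := by
  induction strategies generalizing d with
  | nil => rfl
  | cons x xs ih =>
    have hx := h x (by simp)
    simp only [List.foldl_cons, hx, if_pos]
    exact ih (fun s hs => h s (by simp [hs])) _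

theorem pv_runsGo_replicate (x : String) (k : Int) (c : Nat) (rest : List String) :
    pvRunsGo x k (List.replicate c x ++ rest) = pvRunsGo x (k + c) rest := by
  induction c generalizing k with
  | zero => simp
  | succ n ih =>
    simp only [List.replicate_succ, List.cons_append, pvRunsGo, BEq.rfl, if_pos]
    rw [ih]
    congr 1
    omega

theorem pv_runsGo_ne (x : String) (k : Int) (rest : List String)
    (h : ∀ y ∈ rest, y ≠ x) :
    pvRunsGo x k rest = (x, k) :: pvRuns rest := by
  cases rest with
  | nil => rfl
  | cons y ys =>
    have hy : (y == x) = false := by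
      simpa using h y (by simp)
    simp [pvRunsGo, pvRuns, hy]

theorem pv_runs_replicate_append (x : String) (c : Nat) (rest : List String)
    (h : ∀ y ∈ rest, y ≠ x) :
    pvRuns (List.replicate c x ++ rest) =
      (if c = 0 then [] else [(x, (c : Int))]) ++ pvRuns rest := by
  cases c with
  | zero => simp
  | succ n =>
    simp only [List.replicate_succ, List.cons_append]
    show pvRunsGo x 1 (List.replicate n x ++ rest) = _
    rw [pv_runsGo_replicate, pv_runsGo_ne x _ rest h]
    simp only [Nat.succ_ne_zero, if_neg, not_false_iff, List.singleton_append]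
    congr 2
    omega

-- the canonical sorted form of a valid lineup
def pvCanon (c1 c2 c3 c4 : Nat) : List String :=
  List.replicate c1 "Aggressive" ++ (List.replicate c2 "Cautious" ++
    (List.replicate c3 "ColorCollector" ++ List.replicate c4 "RailRoadTycoon"))

theorem pv_mem_of_pre (strategies : List String) (h : Pre_lineup_tag strategies) :
    ∀ s ∈ strategies, s = "Aggressive" ∨ s = "Cautious" ∨ s = "RailRoadTycoon" ∨ s = "ColorCollector" := by
  unfold Pre_lineup_tag at h
  simp only [List.all_eq_true, Bool.or_eq_true, beq_iff_eq] at h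
  intro s hs
  have := h s hs
  tauto

theorem pv_perm_canon (strategies : List String) (h : Pre_lineup_tag strategies) :
    (pvCanon (strategies.count "Aggressive") (strategies.count "Cautious")
      (strategies.count "ColorCollector") (strategies.count "RailRoadTycoon")).Perm strategies := by
  rw [List.perm_iff_count]
  intro a
  have hmem := pv_mem_of_pre strategies h
  by_cases h1 : a = "Aggressive"
  · subst h1; simp [pvCanon, List.count_append, List.count_replicate]
  by_cases h2 : a = "Cautious"
  · subst h2; simp [pvCanon, List.count_append, List.count_replicate]
  by_cases h3 : a = "ColorCollector"
  · subst h3; simp [pvCanon, List.count_append, List.count_replicate]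
  by_cases h4 : a = "RailRoadTycoon"
  · subst h4; simp [pvCanon, List.count_append, List.count_replicate]
  · have hz : strategies.count a = 0 := by
      rw [List.count_eq_zero]
      intro hmem'
      rcases hmem a hmem' with rfl | rfl | rfl | rfl <;> simp_all
    simp [pvCanon, List.count_append, List.count_replicate,
      Ne.symm h1, Ne.symm h2, Ne.symm h3, Ne.symm h4, hz]

theorem pv_canon_pairwise (c1 c2 c3 c4 : Nat) :
    (pvCanon c1 c2 c3 c4).Pairwise (fun a b => a ≤ b) := by
  unfold pvCanon
  have r : ∀ (c : Nat) (s : String), (List.replicate c s).Pairwise (fun a b => a ≤ b) :=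
    fun c s => List.pairwise_replicate.2 (Or.inr le_rfl)
  refine List.pairwise_append.2 ⟨r _ _, List.pairwise_append.2 ⟨r _ _,
    List.pairwise_append.2 ⟨r _ _, r _ _, ?_⟩, ?_⟩, ?_⟩ <;>
  · intro a ha b hb
    simp only [List.mem_append, List.mem_replicate] at ha hb
    obtain ⟨-, rfl⟩ := ha
    first
      | (rcases hb with ⟨-, rfl⟩ | ⟨-, rfl⟩ | ⟨-, rfl⟩)
      | (rcases hb with ⟨-, rfl⟩ | ⟨-, rfl⟩)
      | (rcases hb with ⟨-, rfl⟩)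
    all_goals rw [String.le_iff_toList_le]; decide

theorem pv_sorted_eq_canon (strategies : List String) (h : Pre_lineup_tag strategies) :
    PySem.List.sorted strategies (fun x => x) false =
      pvCanon (strategies.count "Aggressive") (strategies.count "Cautious")
        (strategies.count "ColorCollector") (strategies.count "RailRoadTycoon") := by
  apply PySem.List.sorted_id_eq_of_perm_of_pairwise
  · exact pv_perm_canon strategies h
  · exact pv_canon_pairwise _ _ _ _

theorem pv_runs_canon (c1 c2 c3 c4 : Nat) :
    pvRuns (pvCanon c1 c2 c3 c4) =
      (if c1 = 0 then [] else [("Aggressive", (c1 : Int))]) ++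
      (if c2 = 0 then [] else [("Cautious", (c2 : Int))]) ++
      (if c3 = 0 then [] else [("ColorCollector", (c3 : Int))]) ++
      (if c4 = 0 then [] else [("RailRoadTycoon", (c4 : Int))]) := by
  unfold pvCanon
  rw [pv_runs_replicate_append _ _ _ (by
    intro y hy; simp only [List.mem_append, List.mem_replicate] at hy
    rcases hy with ⟨_, rfl⟩ | ⟨_, rfl⟩ | ⟨_, rfl⟩ <;> decide)]
  rw [pv_runs_replicate_append _ _ _ (by
    intro y hy; simp only [List.mem_append, List.mem_replicate] at hy
    rcases hy with ⟨_, rfl⟩ | ⟨_, rfl⟩ <;> decide)]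
  rw [pv_runs_replicate_append _ _ _ (by
    intro y hy; simp only [List.mem_replicate] at hy
    rcases hy with ⟨_, rfl⟩; decide)]
  cases c4 with
  | zero => simp [pvRuns]
  | succ n =>
    simp only [List.replicate_succ]
    show _ ++ (_ ++ (_ ++ pvRunsGo "RailRoadTycoon" 1 (List.replicate n "RailRoadTycoon"))) = _
    rw [show List.replicate n "RailRoadTycoon" = List.replicate n "RailRoadTycoon" ++ [] by simp,
      pv_runsGo_replicate, pv_runsGo_ne _ _ [] (by simp)]
    simp only [Nat.succ_ne_zero, if_neg, not_false_iff]
    simp [pvRuns, List.append_assoc]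
    omega

theorem pv_B_eq_render (strategies : List String) (h : Pre_lineup_tag strategies) :
    lineup_tag_alt strategies =
      pvRender (strategies.count "Aggressive") (strategies.count "Cautious")
        (strategies.count "ColorCollector") (strategies.count "RailRoadTycoon") := by
  have hall : strategies.all (fun s => PySem.Set.contains KNOWN_STRATEGIES s) = true := by
    simp only [List.all_eq_true]
    intro s hs
    rcases pv_mem_of_pre strategies h s hs with rfl | rfl | rfl | rfl <;> decide
  simp only [lineup_tag_alt, pvRender]
  rw [if_pos hall, pv_sorted_eq_canon strategies h, pv_runs_canon]
  simp only [List.map_append, pv_map_if]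
  rfl

theorem pv_A_eq_render (strategies : List String) (h : Pre_lineup_tag strategies) :
    lineup_tag strategies =
      pvRender (strategies.count "Aggressive") (strategies.count "Cautious")
        (strategies.count "ColorCollector") (strategies.count "RailRoadTycoon") := by
  have hall : ∀ s ∈ strategies, PySem.Set.contains KNOWN_STRATEGIES s = true := by
    intro s hs
    rcases pv_mem_of_pre strategies h s hs with rfl | rfl | rfl | rfl <;> decide
  simp only [lineup_tag]
  rw [pv_foldOpt strategies hall]
  set counts := strategies.foldl (fun d s => d.modify s 0 (· + 1))
    (PySem.Dict.ofList (STRATEGY_ORDER.map (fun s => (s, (0 : Int))))) with hc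
  have hg : ∀ v : String,
      counts.getD v 0 =
        (PySem.Dict.ofList (STRATEGY_ORDER.map (fun s => (s, (0 : Int))))).getD v 0
          + strategies.count v := by
    intro v; rw [hc, PySem.Dict.getD_foldl_modify_add_one]
  have hz : ∀ v ∈ STRATEGY_ORDER,
      (PySem.Dict.ofList (STRATEGY_ORDER.map (fun s => (s, (0 : Int))))).getD v 0 = 0 := by
    rw [pv_order_eq]; decide
  have h1 : counts.getD "Aggressive" 0 = (strategies.count "Aggressive" : Int) := by
    rw [hg, hz _ (by rw [pv_order_eq]; decide)]; ring
  have h2 : counts.getD "Cautious" 0 = (strategies.count "Cautious" : Int) := by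
    rw [hg, hz _ (by rw [pv_order_eq]; decide)]; ring
  have h3 : counts.getD "ColorCollector" 0 = (strategies.count "ColorCollector" : Int) := by
    rw [hg, hz _ (by rw [pv_order_eq]; decide)]; ring
  have h4 : counts.getD "RailRoadTycoon" 0 = (strategies.count "RailRoadTycoon" : Int) := by
    rw [hg, hz _ (by rw [pv_order_eq]; decide)]; ring
  rw [pv_order_eq]
  simp only [List.foldl_cons, List.foldl_nil, h1, h2, h3, h4]
  unfold pvRender
  by_cases e1 : strategies.count "Aggressive" = 0 <;>
    by_cases e2 : strategies.count "Cautious" = 0 <;>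
      by_cases e3 : strategies.count "ColorCollector" = 0 <;>
        by_cases e4 : strategies.count "RailRoadTycoon" = 0 <;>
  · simp_all [pvPart, Int.natCast_pos, Nat.pos_iff_ne_zero]

-- ===== VERDICT (by name: the statement is the Claim_ definition above) =====
theorem lineup_tag_spec : Claim_equal_lineup_tag := by
  intro strategies _ hpre
  unfold Spec_lineup_tag
  rw [pv_A_eq_render strategies hpre, pv_B_eq_render strategies hpre]
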